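-- pv_equiv track=rewrite | github.com/rcesaret/TeoMappingProject | phases/01_LegacyDB/src/profiling_modules/metrics_performance.py | parse_categorized_queries
-- ===== SOURCE A (Python) =====
-- from typing import Any, Dict, List, Optional, Tuple
--
-- def parse_categorized_queries(sql_content: str) -> List[Tuple[str, str, str]]:
--     """Parse SQL benchmark files containing category and query markers.
--
--     The SQL files are expected to contain blocks marked with ``-- CATEGORY:`` and
--     ``-- QUERY:`` comments::
--
--         -- CATEGORY: baseline
--         -- QUERY: 1.1
--         SELECT COUNT(*) FROM ...;
--
--     Each ``-- QUERY:`` section corresponds to a single executable SQL statement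
--     that belongs to the most recently seen category.
--
--     Returns a list of ``(category, query_id, sql)`` tuples.
--     """
--
--     queries: List[Tuple[str, str, str]] = []
--     current_category = "uncategorized"
--     current_entry: Optional[Dict[str, Any]] = None
--
--     for raw_line in sql_content.splitlines():
--         line = raw_line.strip()
--
--         if line.startswith("-- CATEGORY:"):
--             # Update the active category. This will apply to the next query we
--             # encounter.
--             current_category = line.split(":", 1)[1].strip()
--             continue
--
--         if line.startswith("-- QUERY:"):
--             # Finalize any previous query before starting a new one.
--             if current_entry is not None:
--                 sql = " ".join(current_entry["sql_lines"]).strip()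
--                 if sql.endswith(";"):
--                     sql = sql[:-1]
--                 queries.append(
--                     (current_entry["category"], current_entry["query_id"], sql)
--                 )
--
--             query_id = line.split(":", 1)[1].strip()
--             current_entry = {
--                 "category": current_category,
--                 "query_id": query_id,
--                 "sql_lines": [],
--             }
--             continue
--
--         if current_entry is not None and (line and not line.startswith("--")):
--             current_entry["sql_lines"].append(line)
--
--     # Finalize the last query block if present.
--     if current_entry is not None:
--         sql = " ".join(current_entry["sql_lines"]).strip()
--         if sql.endswith(";"):
--             sql = sql[:-1]
--         queries.append((current_entry["category"], current_entry["query_id"], sql))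
--
--     return queries
-- ===== SOURCE B (Python) =====
-- def parse_categorized_queries(sql_content):
--     """Collect raw (category, query_id, sql_lines) entries in one pass, then
--     transform them into output tuples in a second pass."""
--     entries = []
--     category = "uncategorized"
--     for raw_line in sql_content.splitlines():
--         line = raw_line.strip()
--         if line.startswith("-- CATEGORY:"):
--             category = line.split(":", 1)[1].strip()
--         elif line.startswith("-- QUERY:"):
--             entries.append((category, line.split(":", 1)[1].strip(), []))
--         elif entries and line and not line.startswith("--"):
--             entries[-1][2].append(line)
--     results = []
--     for cat, qid, sql_lines in entries:
--         sql = " ".join(sql_lines).strip()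
--         if sql.endswith(";"):
--             sql = sql[:-1]
--         results.append((cat, qid, sql))
--     return results
-- ===== Notes on version B (the rewrite author's own statement) =====
-- stated objective: alternative
-- what changed: A finalizes each query inline (duplicated join/strip/semicolon block at each new QUERY marker and again after the loop, around an Optional current_entry); B splits the work into two passes: one pass collects raw (category, query_id, sql_lines) entries into a list, a second pass maps each entry to its output tuple, eliminating the Optional state and the duplicated finalize block.
import Mathlib
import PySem

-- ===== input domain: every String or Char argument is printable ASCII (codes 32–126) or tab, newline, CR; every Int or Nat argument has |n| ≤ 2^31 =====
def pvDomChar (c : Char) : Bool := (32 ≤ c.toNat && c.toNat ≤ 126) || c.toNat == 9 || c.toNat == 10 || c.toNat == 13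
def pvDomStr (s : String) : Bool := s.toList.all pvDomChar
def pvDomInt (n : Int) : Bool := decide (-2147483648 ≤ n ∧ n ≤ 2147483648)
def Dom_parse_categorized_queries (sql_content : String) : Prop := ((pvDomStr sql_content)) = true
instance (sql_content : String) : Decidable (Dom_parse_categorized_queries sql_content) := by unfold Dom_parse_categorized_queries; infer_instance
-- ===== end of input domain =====

-- B replaces A's inline finalize-on-new-query (duplicated block around an Optional current_entry)
-- with a collect-then-transform decomposition: same O(n) cost, plainer structure.

-- ===== PORT A =====
-- line.split(":", 1)[1].strip(); the '_ => ""' arm is unreachable at call sites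
-- (every caller checked startswith a prefix containing ':', so the split has two parts).
def pvAfterColonA (line : String) : String :=
  match PySem.Str.splitMax? line ":" 1 with
  | some (_ :: rest :: _) => PySem.Str.strip rest
  | _ => ""

-- the finalize block A writes twice: sql = " ".join(sql_lines).strip(); drop one trailing ';'
def pvFinalizeA (e : String × String × List String) : String × String × String :=
  let sql := PySem.Str.strip (PySem.Str.join " " e.2.2)
  let sql := if PySem.Str.endswith sql ";" then PySem.Str.slice sql none (some (-1)) else sql
  (e.1, e.2.1, sql)

-- loop body over state (queries, current_category, current_entry)
def pvStepA (st : List (String × String × String) × String × Option (String × String × List String))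
    (raw_line : String) :
    List (String × String × String) × String × Option (String × String × List String) :=
  let line := PySem.Str.strip raw_line
  if PySem.Str.startswith line "-- CATEGORY:" then
    (st.1, pvAfterColonA line, st.2.2)
  else if PySem.Str.startswith line "-- QUERY:" then
    let queries := match st.2.2 with
      | some e => st.1 ++ [pvFinalizeA e]
      | none => st.1
    (queries, st.2.1, some (st.2.1, pvAfterColonA line, []))
  else
    match st.2.2 with
    | some e =>
        if !(line == "") && !(PySem.Str.startswith line "--") then
          (st.1, st.2.1, some (e.1, e.2.1, e.2.2 ++ [line]))
        else st
    | none => st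

def parse_categorized_queries (sql_content : String) : List (String × String × String) :=
  let st := (PySem.Str.splitlines sql_content).foldl pvStepA ([], "uncategorized", none)
  match st.2.2 with
  | some e => st.1 ++ [pvFinalizeA e]
  | none => st.1

-- ===== PORT B =====
-- B shares the two line-level helpers with A (pvAfterColonA, and pvFinalizeA as its second pass).
-- entries[-1][2].append(line):
def pvAppendLast : List (String × String × List String) → String → List (String × String × List String)
  | [], _ => []
  | [e], l => [(e.1, e.2.1, e.2.2 ++ [l])]
  | e :: e' :: es, l => e :: pvAppendLast (e' :: es) l

-- first pass's loop body over state (entries, category)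
def pvStepB (st : List (String × String × List String) × String) (raw_line : String) :
    List (String × String × List String) × String :=
  let line := PySem.Str.strip raw_line
  if PySem.Str.startswith line "-- CATEGORY:" then
    (st.1, pvAfterColonA line)
  else if PySem.Str.startswith line "-- QUERY:" then
    (st.1 ++ [(st.2, pvAfterColonA line, [])], st.2)
  else if !st.1.isEmpty && !(line == "") && !(PySem.Str.startswith line "--") then
    (pvAppendLast st.1 line, st.2)
  else st

def parse_categorized_queries_alt (sql_content : String) : List (String × String × String) :=
  (((PySem.Str.splitlines sql_content).foldl pvStepB ([], "uncategorized")).1).map pvFinalizeA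

-- ===== PRECONDITION & SPEC =====
def Spec_parse_categorized_queries (sql_content : String) (out : List (String × String × String)) : Prop := out = parse_categorized_queries_alt sql_content
instance (sql_content : String) (out : List (String × String × String)) : Decidable (Spec_parse_categorized_queries sql_content out) := by unfold Spec_parse_categorized_queries; infer_instance

-- ===== CLAIM (what is proved, stated in full; the proofs are below) =====
def Claim_equal_parse_categorized_queries : Prop := ∀ (sql_content : String), Dom_parse_categorized_queries sql_content → Spec_parse_categorized_queries sql_content (parse_categorized_queries sql_content)

-- ===== LEMMAS AND PROOFS =====

-- invariant linking A's (queries, category, current_entry) with B's (entries, category)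
def pvInv (stA : List (String × String × String) × String × Option (String × String × List String))
    (stB : List (String × String × List String) × String) : Prop :=
  stA.2.1 = stB.2 ∧
    ((stA.2.2 = none ∧ stB.1 = [] ∧ stA.1 = []) ∨
     (∃ es e, stA.2.2 = some e ∧ stB.1 = es ++ [e] ∧ stA.1 = es.map pvFinalizeA))

theorem pvAppendLast_snoc (es : List (String × String × List String)) (e : String × String × List String) (l : String) :
    pvAppendLast (es ++ [e]) l = es ++ [(e.1, e.2.1, e.2.2 ++ [l])] := by
  induction es with
  | nil => rfl
  | cons a t ih =>
      cases t with
      | nil => simp [pvAppendLast]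
      | cons b u => simpa [pvAppendLast] using ih

theorem pvStep_inv (stA : List (String × String × String) × String × Option (String × String × List String))
    (stB : List (String × String × List String) × String) (raw : String)
    (h : pvInv stA stB) : pvInv (pvStepA stA raw) (pvStepB stB raw) := by
  obtain ⟨qs, cat, cur⟩ := stA
  obtain ⟨ents, catB⟩ := stB
  obtain ⟨hcat, hrest⟩ := h
  simp only at hcat
  subst hcat
  by_cases h1 : PySem.Str.startswith (PySem.Str.strip raw) "-- CATEGORY:" = true
  · simp only [pvStepA, pvStepB, if_pos h1]
    exact ⟨rfl, hrest⟩
  · by_cases h2 : PySem.Str.startswith (PySem.Str.strip raw) "-- QUERY:" = true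
    · simp only [pvStepA, pvStepB, if_neg h1, if_pos h2]
      rcases hrest with ⟨hn, hB, hA⟩ | ⟨es, e, hs, hB, hA⟩
      · simp only at hn hB hA; subst_vars
        exact ⟨rfl, Or.inr ⟨[], _, rfl, rfl, rfl⟩⟩
      · simp only at hs hB hA; subst_vars
        exact ⟨rfl, Or.inr ⟨es ++ [e], _, rfl, rfl, by simp⟩⟩
    · simp only [pvStepA, pvStepB, if_neg h1, if_neg h2]
      rcases hrest with ⟨hn, hB, hA⟩ | ⟨es, e, hs, hB, hA⟩
      · simp only at hn hB hA; subst_vars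
        simp only [List.isEmpty_nil, Bool.not_true, Bool.false_and, Bool.false_eq_true,
          not_false_eq_true, if_neg]
        exact ⟨rfl, Or.inl ⟨rfl, rfl, rfl⟩⟩
      · simp only at hs hB hA; subst_vars
        have hne : (es ++ [e]).isEmpty = false := by simp
        by_cases h3 : (!(PySem.Str.strip raw == "") && !(PySem.Str.startswith (PySem.Str.strip raw) "--")) = true
        · simp only [hne, h3, Bool.not_false, Bool.true_and, if_pos]
          rw [pvAppendLast_snoc]
          exact ⟨rfl, Or.inr ⟨es, _, rfl, rfl, rfl⟩⟩
        · simp only [hne, h3, Bool.not_false, Bool.true_and, Bool.false_eq_true,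
            not_false_eq_true, if_neg]
          exact ⟨rfl, Or.inr ⟨es, e, rfl, rfl, rfl⟩⟩

theorem pvFold_inv (lines : List String)
    (stA : List (String × String × String) × String × Option (String × String × List String))
    (stB : List (String × String × List String) × String)
    (h : pvInv stA stB) : pvInv (lines.foldl pvStepA stA) (lines.foldl pvStepB stB) := by
  induction lines generalizing stA stB with
  | nil => exact h
  | cons l t ih =>
      rw [List.foldl_cons, List.foldl_cons]
      exact ih _ _ (pvStep_inv _ _ _ h)

-- ===== VERDICT (by name: the statement is the Claim_ definition above) =====
theorem parse_categorized_queries_spec : Claim_equal_parse_categorized_queries := by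
  intro s _
  unfold Spec_parse_categorized_queries
  have h := pvFold_inv (PySem.Str.splitlines s) ([], "uncategorized", none) ([], "uncategorized")
    ⟨rfl, Or.inl ⟨rfl, rfl, rfl⟩⟩
  obtain ⟨-, hrest⟩ := h
  simp only [parse_categorized_queries, parse_categorized_queries_alt]
  rcases hrest with ⟨hn, hB, hA⟩ | ⟨es, e, hs, hB, hA⟩
  · rw [hn, hB, hA]; rfl
  · rw [hs, hB, hA]
    simp
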